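-- pv_equiv track=rewrite | github.com/MauricioSeg/Challenges-1-El-Laberinto | minimax_lab.py | mover_raton
-- ===== SOURCE A (Python) =====
-- filas = 5
--
-- columnas = 5
--
-- profundidad = 3
--
-- def misma_posicion(pos_1, pos_2):
--     return pos_1[0] == pos_2[0] and pos_1[1] == pos_2[1]
--
-- def calcular_distancia(pos_1, pos_2):
--     return abs(pos_1[0] - pos_2[0]) + abs(pos_1[1] - pos_2[1])
--
-- def movimientos_posibles(posicion):
--     fila, col = posicion
--     movimientos = []
--     for df, dc in [(-1, 0), (1, 0), (0, -1), (0, 1)]: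
--         nueva_fila = fila + df
--         nueva_col  = col + dc
--         if 0 <= nueva_fila < filas and 0 <= nueva_col < columnas:
--             movimientos.append([nueva_fila, nueva_col])
--     return movimientos
--
-- def minimax(gato, raton, profundidad_actual, turno_del_gato):
--     # Si el gato atrapo al raton, termina
--     if misma_posicion(gato, raton):
--         return -1000
--
--     # Si llegamos al limite de profundidad, evaluamos la distancia
--     if profundidad_actual == 0:
--         return calcular_distancia(gato, raton)
--
--     if turno_del_gato:
--         mejor_valor = 9999
--         for movimiento in movimientos_posibles(gato):
--             valor = minimax(movimiento, raton, profundidad_actual - 1, False)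
--             if valor < mejor_valor:
--                 mejor_valor = valor
--         return mejor_valor
--     else:
--         mejor_valor = -9999
--         for movimiento in movimientos_posibles(raton):
--             valor = minimax(gato, movimiento, profundidad_actual - 1, True)
--             if valor > mejor_valor:
--                 mejor_valor = valor
--         return mejor_valor
--
-- def mover_raton(gato, raton):
--     mejor_movimiento = None
--     mejor_valor = -9999
--
--     for movimiento in movimientos_posibles(raton):
--         valor = minimax(gato, movimiento, profundidad - 1, True)
--         if valor > mejor_valor:
--             mejor_valor = valor
--             mejor_movimiento = movimiento
--
--     return mejor_movimiento
-- ===== SOURCE B (Python) =====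
-- filas = 5
-- columnas = 5
-- profundidad = 3
--
-- def movimientos_posibles(posicion):
--     f, c = posicion
--     return [[f + df, c + dc] for df, dc in ((-1, 0), (1, 0), (0, -1), (0, 1))
--             if 0 <= f + df < filas and 0 <= c + dc < columnas]
--
-- def minimax_ab(gato, raton, profundidad_actual, turno_del_gato, alpha, beta):
--     # fail-soft alpha-beta; beta is None for +infinity
--     if gato[0] == raton[0] and gato[1] == raton[1]:
--         return -1000
--     if profundidad_actual == 0:
--         return abs(gato[0] - raton[0]) + abs(gato[1] - raton[1])
--     if turno_del_gato:
--         valor = 9999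
--         for mov in movimientos_posibles(gato):
--             v = minimax_ab(mov, raton, profundidad_actual - 1, False, alpha, beta)
--             if v < valor:
--                 valor = v
--             if valor <= alpha:
--                 return valor          # prune: the mouse already has a move at least this good
--             if beta is None or valor < beta:
--                 beta = valor
--         return valor
--     else:
--         valor = -9999
--         for mov in movimientos_posibles(raton):
--             v = minimax_ab(gato, mov, profundidad_actual - 1, True, alpha, beta)
--             if v > valor:
--                 valor = v
--             if beta is not None and valor >= beta:
--                 return valor          # prune: the cat already has a reply at least this good
--             if valor > alpha:
--                 alpha = valor
--         return valor
--
-- def mover_raton(gato, raton):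
--     mejor_movimiento = None
--     mejor_valor = -9999
--     for movimiento in movimientos_posibles(raton):
--         valor = minimax_ab(gato, movimiento, profundidad - 1, True, mejor_valor, None)
--         if valor > mejor_valor:
--             mejor_valor = valor
--             mejor_movimiento = movimiento
--     return mejor_movimiento
-- ===== Notes on version B (the rewrite author's own statement) =====
-- stated objective: alternative
-- what changed: B replaces the plain fixed-depth minimax tree walk by a fail-soft alpha-beta search (cat nodes cut off once the value drops to alpha, mouse nodes once it reaches beta), threading the root's running best value as alpha so pruned subtrees are never visited; the root loop and first-max tie-breaking are unchanged. Pre_ excludes inputs where A raises (position lists whose length is not 2) and inputs where A returns None (a mouse with no in-grid neighbour), which is not a list.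
-- outside the precondition, e.g. on mover_raton([0, 0], [9, 9]): A returns None, B returns None
import Mathlib
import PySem

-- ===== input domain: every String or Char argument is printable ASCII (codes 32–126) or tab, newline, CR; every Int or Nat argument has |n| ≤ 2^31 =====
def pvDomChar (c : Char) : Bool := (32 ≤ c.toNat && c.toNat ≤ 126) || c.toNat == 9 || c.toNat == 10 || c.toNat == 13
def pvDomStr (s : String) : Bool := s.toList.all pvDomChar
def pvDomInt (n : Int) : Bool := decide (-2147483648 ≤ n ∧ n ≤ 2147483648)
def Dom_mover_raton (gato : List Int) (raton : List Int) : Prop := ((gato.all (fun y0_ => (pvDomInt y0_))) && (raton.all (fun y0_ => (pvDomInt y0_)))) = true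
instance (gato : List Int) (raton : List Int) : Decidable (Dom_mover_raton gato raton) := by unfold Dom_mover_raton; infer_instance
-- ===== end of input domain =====

-- B replaces the plain minimax tree search by a fail-soft alpha-beta search (same root
-- loop, but subtrees are pruned as soon as their value cannot change the chosen move).

-- ===== PORT A =====
def pvFilas : Int := 5
def pvColumnas : Int := 5
def pvProfundidad : Nat := 3

-- exact when both lists have at least 2 elements (guaranteed under Pre_, where all
-- positions reaching it have length 2; Python raises IndexError on shorter lists)
def misma_posicion (pos1 pos2 : List Int) : Bool :=
  (PySem.List.pyGet? pos1 0 == PySem.List.pyGet? pos2 0) &&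
  (PySem.List.pyGet? pos1 1 == PySem.List.pyGet? pos2 1)

-- exact when both lists have length ≥ 2 (Pre_); the default 0 is never used then
def calcular_distancia (pos1 pos2 : List Int) : Int :=
  ((PySem.List.pyGetD pos1 0 0) - (PySem.List.pyGetD pos2 0 0)).natAbs +
  ((PySem.List.pyGetD pos1 1 0) - (PySem.List.pyGetD pos2 1 0)).natAbs

-- 'fila, col = posicion' raises unless the list has exactly 2 elements (excluded by Pre_)
def movimientos_posibles (posicion : List Int) : List (List Int) :=
  match posicion with
  | [fila, col] =>
      [((-1 : Int), (0 : Int)), (1, 0), (0, -1), (0, 1)].foldl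
        (fun movimientos d =>
          let nueva_fila := fila + d.1
          let nueva_col := col + d.2
          if 0 ≤ nueva_fila ∧ nueva_fila < pvFilas ∧ 0 ≤ nueva_col ∧ nueva_col < pvColumnas then
            movimientos ++ [[nueva_fila, nueva_col]]
          else movimientos) []
  | _ => []

def mmCatLoop (child : List Int → Int) : List (List Int) → Int → Int
  | [], mejor_valor => mejor_valor
  | mov :: rest, mejor_valor =>
      let valor := child mov
      mmCatLoop child rest (if valor < mejor_valor then valor else mejor_valor)

def mmMouseLoop (child : List Int → Int) : List (List Int) → Int → Int
  | [], mejor_valor => mejor_valor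
  | mov :: rest, mejor_valor =>
      let valor := child mov
      mmMouseLoop child rest (if valor > mejor_valor then valor else mejor_valor)

def minimax (gato raton : List Int) (profundidad_actual : Nat) (turno_del_gato : Bool) : Int :=
  if misma_posicion gato raton then -1000
  else match profundidad_actual with
  | 0 => calcular_distancia gato raton
  | p + 1 =>
    if turno_del_gato then
      mmCatLoop (fun mov => minimax mov raton p false) (movimientos_posibles gato) 9999
    else
      mmMouseLoop (fun mov => minimax gato mov p true) (movimientos_posibles raton) (-9999)

def mmRootLoop (gato : List Int) (movs : List (List Int))
    (mejor_movimiento : Option (List Int)) (mejor_valor : Int) : Option (List Int) × Int :=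
  match movs with
  | [] => (mejor_movimiento, mejor_valor)
  | mov :: rest =>
      let valor := minimax gato mov (pvProfundidad - 1) true
      if valor > mejor_valor then mmRootLoop gato rest (some mov) valor
      else mmRootLoop gato rest mejor_movimiento mejor_valor

-- Python returns None when the loop never selects a move; Pre_ excludes those inputs
def mover_raton (gato raton : List Int) : List Int :=
  ((mmRootLoop gato (movimientos_posibles raton) none (-9999)).1).getD []

-- ===== PORT B =====
-- 'f, c = posicion' raises unless the list has exactly 2 elements (excluded by Pre_)
def vecinos (posicion : List Int) : List (List Int) :=
  match posicion with
  | [f, c] =>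
      [((-1 : Int), (0 : Int)), (1, 0), (0, -1), (0, 1)].filterMap
        (fun d =>
          if 0 ≤ f + d.1 ∧ f + d.1 < 5 ∧ 0 ≤ c + d.2 ∧ c + d.2 < 5 then
            some [f + d.1, c + d.2]
          else none)
  | _ => []

-- 'beta is not None and valor >= beta' from Source B (the cutoff test)
def pruneB (beta : Option Int) (v : Int) : Bool :=
  match beta with | some b => v ≥ b | none => false

-- 'if beta is None or valor < beta: beta = valor' from Source B, as the new beta value
def newBeta (beta : Option Int) (v : Int) : Option Int :=
  some (match beta with | none => v | some b => if v < b then v else b)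

-- the cat (minimising) loop: beta shrinks along the moves, cutoff at alpha
def abCatLoop (child : List Int → Option Int → Int) (alpha : Int) :
    Option Int → List (List Int) → Int → Int
  | _, [], valor => valor
  | beta, mov :: rest, valor =>
      let v := child mov beta
      let valor' := if v < valor then v else valor
      if valor' ≤ alpha then valor'   -- prune: the mouse already has a move at least this good
      else abCatLoop child alpha (newBeta beta valor') rest valor'

-- the mouse (maximising) loop: alpha grows along the moves, cutoff at beta
def abMouseLoop (child : List Int → Int → Int) (beta : Option Int) :
    Int → List (List Int) → Int → Int
  | _, [], valor => valor
  | alpha, mov :: rest, valor =>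
      let v := child mov alpha
      let valor' := if v > valor then v else valor
      if pruneB beta valor' then valor'   -- prune: the cat already has a reply at least this good
      else abMouseLoop child beta (if valor' > alpha then valor' else alpha) rest valor'

-- fail-soft alpha-beta; beta = none stands for +infinity
def minimax_ab (gato raton : List Int) (prof : Nat) (turno_del_gato : Bool)
    (alpha : Int) (beta : Option Int) : Int :=
  if (PySem.List.pyGet? gato 0 == PySem.List.pyGet? raton 0) &&
     (PySem.List.pyGet? gato 1 == PySem.List.pyGet? raton 1) then -1000
  else match prof with
  | 0 =>
      ((PySem.List.pyGetD gato 0 0) - (PySem.List.pyGetD raton 0 0)).natAbs +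
      ((PySem.List.pyGetD gato 1 0) - (PySem.List.pyGetD raton 1 0)).natAbs
  | p + 1 =>
    if turno_del_gato then
      abCatLoop (fun mov b => minimax_ab mov raton p false alpha b) alpha beta (vecinos gato) 9999
    else
      abMouseLoop (fun mov a => minimax_ab gato mov p true a beta) beta alpha (vecinos raton) (-9999)

def abRootLoop (gato : List Int) (movs : List (List Int))
    (mejor_movimiento : Option (List Int)) (mejor_valor : Int) : Option (List Int) × Int :=
  match movs with
  | [] => (mejor_movimiento, mejor_valor)
  | mov :: rest =>
      let valor := minimax_ab gato mov (3 - 1) true mejor_valor none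
      if valor > mejor_valor then abRootLoop gato rest (some mov) valor
      else abRootLoop gato rest mejor_movimiento mejor_valor

def mover_raton_alt (gato raton : List Int) : List Int :=
  ((abRootLoop gato (vecinos raton) none (-9999)).1).getD []

-- ===== PRECONDITION & SPEC =====
-- Pre_ excludes inputs on which Python A raises (a position list whose length is not 2,
-- where 'fila, col = posicion' or pos[i] fails) and inputs on which A returns None — not a
-- list — because the mouse has no in-grid neighbour, so the root loop never fires.
def Pre_mover_raton (gato : List Int) (raton : List Int) : Prop :=
  gato.length = 2 ∧ raton.length = 2 ∧
  (let f := PySem.List.pyGetD raton 0 0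
   let c := PySem.List.pyGetD raton 1 0
   (0 ≤ f - 1 ∧ f - 1 < 5 ∧ 0 ≤ c ∧ c < 5) ∨ (0 ≤ f + 1 ∧ f + 1 < 5 ∧ 0 ≤ c ∧ c < 5) ∨
   (0 ≤ f ∧ f < 5 ∧ 0 ≤ c - 1 ∧ c - 1 < 5) ∨ (0 ≤ f ∧ f < 5 ∧ 0 ≤ c + 1 ∧ c + 1 < 5))
instance (gato : List Int) (raton : List Int) : Decidable (Pre_mover_raton gato raton) := by
  unfold Pre_mover_raton; infer_instance

def pvWitness_mover_raton : List Int × List Int := ([0, 0], [2, 2])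

def Spec_mover_raton (gato : List Int) (raton : List Int) (out : List Int) : Prop := out = mover_raton_alt gato raton
instance (gato : List Int) (raton : List Int) (out : List Int) : Decidable (Spec_mover_raton gato raton out) := by unfold Spec_mover_raton; infer_instance

-- ===== CLAIM (what is proved, stated in full; the proofs are below) =====
def Claim_equal_mover_raton : Prop := ∀ (gato : List Int) (raton : List Int), Dom_mover_raton gato raton → Pre_mover_raton gato raton → Spec_mover_raton gato raton (mover_raton gato raton)

-- ===== LEMMAS AND PROOFS =====

theorem vecinos_eq (pos : List Int) : vecinos pos = movimientos_posibles pos := by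
  unfold vecinos movimientos_posibles
  cases pos with
  | nil => rfl
  | cons f t =>
    cases t with
    | nil => rfl
    | cons c t2 =>
      cases t2 with
      | nil =>
        simp only [List.filterMap, List.foldl, pvFilas, pvColumnas]
        split_ifs <;> simp_all
      | cons _ _ => rfl

-- beta = none means +infinity; the window is open while alpha is below it
def okb (alpha : Int) (beta : Option Int) : Prop := ∀ b, beta = some b → alpha < b

theorem mmCatLoop_le (child : List Int → Int) (movs : List (List Int)) :
    ∀ val : Int, mmCatLoop child movs val ≤ val := by
  induction movs with
  | nil => intro val; simp [mmCatLoop]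
  | cons mov rest ih =>
    intro val
    rw [mmCatLoop]
    exact le_trans (ih _) (by split <;> omega)

theorem mmMouseLoop_ge (child : List Int → Int) (movs : List (List Int)) :
    ∀ val : Int, val ≤ mmMouseLoop child movs val := by
  induction movs with
  | nil => intro val; simp [mmMouseLoop]
  | cons mov rest ih =>
    intro val
    rw [mmMouseLoop]
    exact le_trans (by split <;> omega) (ih _)

theorem abCatLoop_le (child : List Int → Option Int → Int) (alpha : Int) (movs : List (List Int)) :
    ∀ (beta : Option Int) (val : Int), abCatLoop child alpha beta movs val ≤ val := by
  induction movs with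
  | nil => intro _ val; simp [abCatLoop]
  | cons mov rest ih =>
    intro beta val
    rw [abCatLoop]
    split <;> split <;> first | omega | exact le_trans (ih _ _) (by omega)

theorem abMouseLoop_ge (child : List Int → Int → Int) (beta : Option Int) (movs : List (List Int)) :
    ∀ (alpha : Int) (val : Int), val ≤ abMouseLoop child beta alpha movs val := by
  induction movs with
  | nil => intro _ val; simp [abMouseLoop]
  | cons mov rest ih =>
    intro alpha val
    rw [abMouseLoop]
    repeat' split
    all_goals first | omega | exact ih _ _ | (refine le_trans ?_ (ih _ _); omega)

-- the three fail-soft alpha-beta guarantees, for the cat (minimising) loop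
theorem abCat_loop (alpha : Int) (childA : List Int → Int) (childB : List Int → Option Int → Int)
    (hchild : ∀ (mov : List Int) (beta : Option Int), okb alpha beta →
      (childA mov ≤ alpha → childB mov beta ≤ alpha) ∧
      (alpha < childA mov → (∀ b, beta = some b → childA mov < b) →
        childB mov beta = childA mov) ∧
      (∀ b, beta = some b → b ≤ childA mov → b ≤ childB mov beta)) :
    ∀ (movs : List (List Int)) (valA valB : Int) (beta : Option Int), okb alpha beta →
      (valB = valA ∨ ∃ b, beta = some b ∧ b ≤ valA ∧ b ≤ valB) →
      (mmCatLoop childA movs valA ≤ alpha → abCatLoop childB alpha beta movs valB ≤ alpha) ∧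
      (alpha < mmCatLoop childA movs valA →
        (∀ b, beta = some b → mmCatLoop childA movs valA < b) →
        abCatLoop childB alpha beta movs valB = mmCatLoop childA movs valA) ∧
      (∀ b, beta = some b → b ≤ mmCatLoop childA movs valA →
        b ≤ abCatLoop childB alpha beta movs valB) := by
  intro movs
  induction movs with
  | nil =>
    intro valA valB beta hok hacc
    simp only [mmCatLoop, abCatLoop]
    rcases hacc with h | ⟨b, hb, h1, h2⟩
    · subst h; exact ⟨fun h => h, fun _ _ => rfl, fun b hb h => by omega⟩
    · have := hok b hb
      refine ⟨fun h => by omega, fun h hlt => ?_, fun b' hb' h => ?_⟩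
      · have := hlt b hb; omega
      · rw [hb] at hb'; injection hb' with e; omega
  | cons mov rest ihl =>
    intro valA valB beta hok hacc
    rw [mmCatLoop, abCatLoop]
    set vc := childA mov with hvc
    set rc := childB mov beta with hrc
    obtain ⟨c1, c2, c3⟩ := hchild mov beta hok
    rw [← hvc, ← hrc] at c1 c2 c3
    set valA' := if vc < valA then vc else valA with hA'
    set valB' := if rc < valB then rc else valB with hB'
    have hwle := mmCatLoop_le childA rest valA'
    set w := mmCatLoop childA rest valA' with hw
    have hA'le : valA' ≤ valA ∧ valA' ≤ vc := by rw [hA']; constructor <;> (split <;> omega)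
    by_cases hva : vc ≤ alpha
    · -- child value below alpha: its ab value is too, and we prune
      have h1 : rc ≤ alpha := c1 hva
      have hp : valB' ≤ alpha := by rw [hB']; split <;> omega
      rw [if_pos hp]
      refine ⟨fun _ => hp, fun hgt _ => by omega, fun b hb hble => ?_⟩
      have := hok b hb; omega
    · push_neg at hva
      rcases beta with _ | b
      · -- beta = +infinity
        simp only [newBeta]
        have hBA : valB = valA := by
          rcases hacc with h | ⟨b, hb, _, _⟩
          · exact h
          · exact absurd hb (by simp)
        have h2 : rc = vc := c2 hva (by intro b hb; exact absurd hb (by simp))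
        have hBA' : valB' = valA' := by rw [hA', hB', h2, hBA]
        by_cases hp : valB' ≤ alpha
        · rw [if_pos hp]
          refine ⟨fun _ => hp, fun hgt _ => by omega, fun b hb _ => by exact absurd hb (by simp)⟩
        · rw [if_neg hp]
          push_neg at hp
          have hok' : okb alpha (some valB') := by intro b hb; injection hb with e; omega
          obtain ⟨g1, g2, g3⟩ := ihl valA' valB' (some valB') hok' (Or.inl hBA')
          have hres := abCatLoop_le childB alpha rest (some valB') valB'
          refine ⟨g1, fun hgt _ => ?_, fun b hb _ => by exact absurd hb (by simp)⟩
          rcases lt_or_eq_of_le hwle with hlt | heq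
          · exact g2 hgt (by intro b hb; injection hb with e; omega)
          · have := g3 valB' rfl (by omega)
            omega
      · -- beta = some b
        simp only [newBeta]
        have hab := hok b rfl
        by_cases hvb : vc < b
        · -- child exact inside the window
          have h2 : rc = vc := c2 hva (by intro b' hb'; injection hb' with e; omega)
          have hBA' : valB' = valA' := by
            rcases hacc with h | ⟨b', hb', hba, hbb⟩
            · rw [hA', hB', h2, h]
            · injection hb' with e; subst e
              rw [hA', hB', h2]; split <;> split <;> omega
          by_cases hp : valB' ≤ alpha
          · rw [if_pos hp]
            refine ⟨fun _ => hp, fun hgt _ => by omega, fun b' hb' hble => ?_⟩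
            injection hb' with e; omega
          · rw [if_neg hp]
            push_neg at hp
            set b' := if valB' < b then valB' else b with hb'def
            have hb'1 : b' ≤ b ∧ b' ≤ valB' ∧ alpha < b' := by rw [hb'def]; split <;> omega
            have hok' : okb alpha (some b') := by intro x hx; injection hx with e; omega
            obtain ⟨g1, g2, g3⟩ := ihl valA' valB' (some b') hok'
              (Or.inr ⟨b', rfl, by omega, by omega⟩)
            have hres := abCatLoop_le childB alpha rest (some b') valB'
            refine ⟨g1, fun hgt hb2 => ?_, fun b2 hb2 hble => ?_⟩
            · have hwb : w < b := hb2 b rfl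
              rcases lt_or_eq_of_le hwle with hlt | heq
              · exact g2 hgt (by intro x hx; injection hx with e; omega)
              · have : b' ≤ w := by omega
                have := g3 b' rfl this; omega
            · injection hb2 with e; subst e; omega
        · -- child at or above beta: only the lower bound survives
          push_neg at hvb
          have h3 : b ≤ rc := c3 b rfl hvb
          by_cases hp : valB' ≤ alpha
          · rw [if_pos hp]
            have hvB : valB ≤ alpha := by
              have : valB' = if rc < valB then rc else valB := hB'
              split at this <;> omega
            rcases hacc with h | ⟨b2, hb2, hba, hbb⟩
            · refine ⟨fun _ => hp, fun hgt _ => by omega, fun b2 hb2 hble => ?_⟩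
              · injection hb2 with e; subst e
                have : w ≤ valA := by omega
                omega
            · injection hb2 with e; subst e; omega
          · rw [if_neg hp]
            push_neg at hp
            have hvB'b : b ≤ valB' ∨ valB' = valB := by rw [hB']; split <;> omega
            have hbvB : b ≤ valB ∨ valB = valA := by
              rcases hacc with h | ⟨b2, hb2, hba, hbb⟩
              · right; exact h
              · injection hb2 with e; subst e; left; exact hbb
            set b' := if valB' < b then valB' else b with hb'def
            have hb'1 : b' ≤ b ∧ b' ≤ valB' ∧ alpha < b' := by rw [hb'def]; split <;> omega
            have hok' : okb alpha (some b') := by intro x hx; injection hx with e; omega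
            have hvv : valB' ≤ valB := by rw [hB']; split <;> omega
            have hb'A : b' ≤ valA' := by
              rcases hacc with h | ⟨b2, hb2, hba, hbb⟩
              · rw [hA']; split <;> omega
              · injection hb2 with e
                rw [hA']; split <;> omega
            obtain ⟨g1, g2, g3⟩ := ihl valA' valB' (some b') hok'
              (Or.inr ⟨b', rfl, hb'A, by omega⟩)
            have hres := abCatLoop_le childB alpha rest (some b') valB'
            refine ⟨g1, fun hgt hb2 => ?_, fun b2 hb2 hble => ?_⟩
            · have hwb : w < b := hb2 b rfl
              by_cases hwB' : w < valB'
              · exact g2 hgt (by intro x hx; injection hx with e; omega)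
              · -- w = min cap reached: w ≥ valB', but w ≤ valA'
                have hwb' : b' ≤ w ∨ w < b' := by omega
                rcases hwb' with h | h
                · have := g3 b' rfl h
                  have hb'w : b' ≤ valB' := by omega
                  -- res between b' and valB'; and w between valB' and ... need w = valB'
                  have hwA : w ≤ valA' := hwle
                  have : valB' ≤ w := by omega
                  have hbeq : b' = valB' ∨ b' = b := by rw [hb'def]; split <;> omega
                  rcases hbeq with he | he <;> omega
                · exact g2 hgt (by intro x hx; injection hx with e; omega)
            · injection hb2 with e; subst e
              have hbw : b ≤ w := hble
              have hb'b : b' = b := by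
                rw [hb'def]; split <;> omega
              have := g3 b' rfl (by omega)
              omega

-- the three fail-soft alpha-beta guarantees, for the mouse (maximising) loop
theorem abMouse_loop (beta : Option Int) (childA : List Int → Int) (childB : List Int → Int → Int)
    (hchild : ∀ (mov : List Int) (alpha : Int), okb alpha beta →
      (childA mov ≤ alpha → childB mov alpha ≤ alpha) ∧
      (alpha < childA mov → (∀ b, beta = some b → childA mov < b) →
        childB mov alpha = childA mov) ∧
      (∀ b, beta = some b → b ≤ childA mov → b ≤ childB mov alpha)) :
    ∀ (movs : List (List Int)) (valA valB alpha : Int), okb alpha beta →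
      (valB = valA ∨ (valA ≤ alpha ∧ valB ≤ alpha)) →
      (mmMouseLoop childA movs valA ≤ alpha → abMouseLoop childB beta alpha movs valB ≤ alpha) ∧
      (alpha < mmMouseLoop childA movs valA →
        (∀ b, beta = some b → mmMouseLoop childA movs valA < b) →
        abMouseLoop childB beta alpha movs valB = mmMouseLoop childA movs valA) ∧
      (∀ b, beta = some b → b ≤ mmMouseLoop childA movs valA →
        b ≤ abMouseLoop childB beta alpha movs valB) := by
  intro movs
  induction movs with
  | nil =>
    intro valA valB alpha hok hacc
    simp only [mmMouseLoop, abMouseLoop]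
    rcases hacc with h | ⟨h1, h2⟩
    · subst h; exact ⟨fun h => h, fun _ _ => rfl, fun b hb h => by omega⟩
    · refine ⟨fun _ => h2, fun h _ => by omega, fun b hb h => ?_⟩
      have := hok b hb; omega
  | cons mov rest ihl =>
    intro valA valB alpha hok hacc
    rw [mmMouseLoop, abMouseLoop]
    set vc := childA mov with hvc
    set rc := childB mov alpha with hrc
    obtain ⟨c1, c2, c3⟩ := hchild mov alpha hok
    rw [← hvc, ← hrc] at c1 c2 c3
    set valA' := if vc > valA then vc else valA with hA'
    set valB' := if rc > valB then rc else valB with hB'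
    have hwge := mmMouseLoop_ge childA rest valA'
    set w := mmMouseLoop childA rest valA' with hw
    have hA'ge : valA ≤ valA' ∧ vc ≤ valA' := by rw [hA']; constructor <;> (split <;> omega)
    have hprune : pruneB beta valB' = true ↔ ∃ b, beta = some b ∧ b ≤ valB' := by
      rcases beta with _ | b <;> simp [pruneB]
    by_cases hva : vc ≤ alpha
    · -- child value below alpha: its ab value is too
      have h1 : rc ≤ alpha := c1 hva
      by_cases hvalA : valA ≤ alpha
      · -- everything stays at or below alpha; no prune, alpha unchanged
        have hB'le : valB' ≤ alpha := by
          have hvB : valB ≤ alpha := by rcases hacc with h | ⟨_, h⟩ <;> omega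
          rw [hB']; split <;> omega
        rw [if_neg (by rw [hprune]; rintro ⟨b, hb, hble⟩; have := hok b hb; omega)]
        have ha' : (if valB' > alpha then valB' else alpha) = alpha := by split <;> omega
        rw [ha']
        exact ihl valA' valB' alpha hok (Or.inr ⟨by rw [hA']; split <;> omega, hB'le⟩)
      · -- valA above alpha: then valB = valA and both accumulators stay put
        push_neg at hvalA
        have hBA : valB = valA := by
          rcases hacc with h | ⟨h, _⟩
          · exact h
          · omega
        have hB'A' : valB' = valA' := by rw [hA', hB', hBA]; split <;> split <;> omega
        by_cases hp : ∃ b, beta = some b ∧ b ≤ valB'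
        · rw [if_pos (hprune.mpr hp)]
          obtain ⟨b, hb, hble⟩ := hp
          refine ⟨fun hle => by omega, fun hgt hb2 => ?_, fun b2 hb2 hble2 => ?_⟩
          · have := hb2 b hb; omega
          · rw [hb] at hb2; injection hb2 with e; omega
        · rw [if_neg (by rw [hprune]; exact hp)]
          have hok' : okb (if valB' > alpha then valB' else alpha) beta := by
            intro b hb
            have := hok b hb
            have : ¬ (b ≤ valB') := fun hc => hp ⟨b, hb, hc⟩
            split <;> omega
          obtain ⟨g1, g2, g3⟩ := ihl valA' valB'
            (if valB' > alpha then valB' else alpha) hok' (Or.inl hB'A')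
          have hres := abMouseLoop_ge childB beta rest (if valB' > alpha then valB' else alpha) valB'
          refine ⟨fun hle => by omega, fun hgt hb2 => ?_, fun b hb hble => g3 b hb hble⟩
          rcases lt_or_eq_of_le hwge with hlt | heq
          · exact g2 (by split <;> omega) hb2
          · have := g1 (by split <;> omega)
            omega
    · push_neg at hva
      by_cases hvb : ∀ b, beta = some b → vc < b
      · -- child exact inside the window
        have h2 : rc = vc := c2 hva hvb
        have hB'A' : valB' = valA' := by
          rcases hacc with h | ⟨h1', h2'⟩
          · rw [hA', hB', h2, h]
          · rw [hA', hB', h2]; split <;> split <;> omega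
        by_cases hp : ∃ b, beta = some b ∧ b ≤ valB'
        · obtain ⟨b, hb, hble⟩ := hp
          have := hvb b hb
          have : vc ≤ valA' := hA'ge.2
          have hvA'b : b ≤ valA' := by omega
          rw [if_pos (hprune.mpr ⟨b, hb, hble⟩)]
          refine ⟨fun hle => ?_, fun hgt hb2 => ?_, fun b2 hb2 hble2 => ?_⟩
          · have := hok b hb; omega
          · have := hb2 b hb; omega
          · rw [hb] at hb2; injection hb2 with e; omega
        · rw [if_neg (by rw [hprune]; exact hp)]
          have hok' : okb (if valB' > alpha then valB' else alpha) beta := by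
            intro b hb
            have := hok b hb
            have : ¬ (b ≤ valB') := fun hc => hp ⟨b, hb, hc⟩
            split <;> omega
          obtain ⟨g1, g2, g3⟩ := ihl valA' valB'
            (if valB' > alpha then valB' else alpha) hok' (Or.inl hB'A')
          have hres := abMouseLoop_ge childB beta rest (if valB' > alpha then valB' else alpha) valB'
          refine ⟨fun hle => ?_, fun hgt hb2 => ?_, fun b hb hble => g3 b hb hble⟩
          · have : vc ≤ valA' := hA'ge.2; omega
          · rcases lt_or_eq_of_le hwge with hlt | heq
            · exact g2 (by split <;> omega) hb2
            · have := g1 (by split <;> omega)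
              omega
      · -- child at or above beta: prune immediately
        push_neg at hvb
        obtain ⟨b, hb, hble⟩ := hvb
        have h3 : b ≤ rc := c3 b hb hble
        have hB'b : b ≤ valB' := by rw [hB']; split <;> omega
        rw [if_pos (hprune.mpr ⟨b, hb, hB'b⟩)]
        have hvA' : vc ≤ valA' := hA'ge.2
        have := hok b hb
        refine ⟨fun hle => by omega, fun hgt hb2 => ?_, fun b2 hb2 hble2 => ?_⟩
        · have := hb2 b hb; omega
        · rw [hb] at hb2; injection hb2 with e; omega

-- fail-soft alpha-beta computes the exact minimax value inside the (alpha, beta) window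
-- and a sound bound outside it
theorem ab_main : ∀ (p : Nat) (g r : List Int) (t : Bool) (alpha : Int) (beta : Option Int),
    okb alpha beta →
    (minimax g r p t ≤ alpha → minimax_ab g r p t alpha beta ≤ alpha) ∧
    (alpha < minimax g r p t → (∀ b, beta = some b → minimax g r p t < b) →
      minimax_ab g r p t alpha beta = minimax g r p t) ∧
    (∀ b, beta = some b → b ≤ minimax g r p t → b ≤ minimax_ab g r p t alpha beta) := by
  intro p
  induction p with
  | zero =>
    intro g r t alpha beta hok
    rw [minimax, minimax_ab, misma_posicion]
    split
    · exact ⟨fun h => h, fun _ _ => rfl, fun b hb h => h⟩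
    · rw [calcular_distancia]
      exact ⟨fun h => h, fun _ _ => rfl, fun b hb h => h⟩
  | succ p ih =>
    intro g r t alpha beta hok
    rw [minimax, minimax_ab, misma_posicion]
    split
    · exact ⟨fun h => h, fun _ _ => rfl, fun b hb h => h⟩
    · cases t with
      | true =>
        simp only [vecinos_eq, reduceIte]
        exact abCat_loop alpha (fun mov => minimax mov r p false)
          (fun mov b => minimax_ab mov r p false alpha b)
          (fun mov b hok' => ih mov r false alpha b hok')
          (movimientos_posibles g) 9999 9999 beta hok (Or.inl rfl)
      | false =>
        norm_num [vecinos_eq]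
        exact abMouse_loop beta (fun mov => minimax g mov p true)
          (fun mov a => minimax_ab g mov p true a beta)
          (fun mov a hok' => ih g mov true a beta hok')
          (movimientos_posibles r) (-9999) (-9999) alpha hok (Or.inl rfl)

theorem root_eq (gato : List Int) : ∀ (movs : List (List Int))
    (best : Option (List Int)) (bestval : Int),
    abRootLoop gato movs best bestval = mmRootLoop gato movs best bestval := by
  intro movs
  induction movs with
  | nil => intro best bestval; rfl
  | cons mov rest ih =>
    intro best bestval
    rw [abRootLoop, mmRootLoop]
    obtain ⟨c1, c2, c3⟩ := ab_main (3 - 1) gato mov true bestval none (by intro b hb; cases hb)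
    have hpv : pvProfundidad - 1 = 3 - 1 := rfl
    rw [hpv]
    by_cases hgt : minimax gato mov (3 - 1) true > bestval
    · rw [c2 hgt (by intro b hb; cases hb)]
      rw [if_pos hgt, if_pos hgt, ih]
    · have h1 : minimax_ab gato mov (3 - 1) true bestval none ≤ bestval := c1 (by omega)
      rw [if_neg (by omega), if_neg hgt, ih]

-- ===== VERDICT (by name: the statement is the Claim_ definition above) =====
theorem mover_raton_spec : Claim_equal_mover_raton := by
  intro gato raton _ _
  unfold Spec_mover_raton mover_raton mover_raton_alt
  rw [vecinos_eq, root_eq]
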